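-- pv_equiv track=rewrite | github.com/filiprumenovski/GasRegNet | gasregnet/scoring/controls.py | _rows_by_match_key
-- ===== SOURCE A (Python) =====
-- def _rows_by_match_key(
--     rows: list[dict[str, object]],
-- ) -> dict[tuple[str, str], list[int]]:
--     grouped: dict[tuple[str, str], list[int]] = {}
--     for index, row in enumerate(rows):
--         key = (str(row["organism"]), str(row["contig_id"]))
--         grouped.setdefault(key, []).append(index)
--     return grouped
-- ===== SOURCE B (Python) =====
-- def _rows_by_match_key(
--     rows: list[dict[str, object]],
-- ) -> dict[tuple[str, str], list[int]]:
--     keys = [(str(row["organism"]), str(row["contig_id"])) for row in rows]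
--     return {
--         key: [index for index, k in enumerate(keys) if k == key]
--         for key in dict.fromkeys(keys)
--     }
-- ===== Notes on version B (the rewrite author's own statement) =====
-- stated objective: simpler
-- what changed: Replaces the streaming setdefault-dict pass by a two-phase decomposition: materialize each row's (organism, contig_id) key, dedup the keys in first-occurrence order with dict.fromkeys, then build each group's index list by a comprehension over the enumerated key list.
import Mathlib
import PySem

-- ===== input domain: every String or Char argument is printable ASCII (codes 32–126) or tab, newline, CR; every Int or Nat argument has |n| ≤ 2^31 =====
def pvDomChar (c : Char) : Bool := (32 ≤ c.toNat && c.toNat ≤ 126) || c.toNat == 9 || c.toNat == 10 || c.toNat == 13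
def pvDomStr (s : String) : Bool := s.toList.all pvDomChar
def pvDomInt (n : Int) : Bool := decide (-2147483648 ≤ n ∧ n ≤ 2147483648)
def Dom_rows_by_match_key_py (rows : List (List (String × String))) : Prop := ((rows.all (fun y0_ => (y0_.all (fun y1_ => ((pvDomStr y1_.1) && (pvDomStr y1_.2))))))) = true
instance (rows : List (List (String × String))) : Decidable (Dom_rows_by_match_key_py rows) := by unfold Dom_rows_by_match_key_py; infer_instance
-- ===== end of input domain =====

-- B replaces A's streaming setdefault-dict pass by: materialize the key of every row, dedup the
-- keys in first-occurrence order (dict.fromkeys), and collect each key's indices by a comprehension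
-- over the enumerated key list (objective: simpler; not faster).

-- ===== PORT A =====
-- shared with port B: the expression (str(row["organism"]), str(row["contig_id"])) both Pythons use
-- (values are strings on this domain, so str() is the identity)
def pvKey (row : List (String × String)) : String × String :=
  ((PySem.Dict.mk row).getD "organism" "", (PySem.Dict.mk row).getD "contig_id" "")

def rows_by_match_key_py (rows : List (List (String × String))) : List (String × String × List Int) :=
  (((PySem.List.enumerate rows 0).foldl
      (fun (g : PySem.Dict (String × String) (List Int)) p =>
        g.modify (pvKey p.2) [] (fun v => v ++ [p.1]))
      PySem.Dict.empty)).items.map (fun kv => (kv.1.1, kv.1.2, kv.2))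

-- ===== PORT B =====
def rows_by_match_key_py_alt (rows : List (List (String × String))) : List (String × String × List Int) :=
  (PySem.List.dedup (rows.map pvKey)).map (fun k =>
    (k.1, k.2,
      ((PySem.List.enumerate (rows.map pvKey) 0).filter (fun p => p.2 == k)).map (·.1)))

-- ===== PRECONDITION & SPEC =====
-- Pre_ excludes exactly the rows missing an "organism" or "contig_id" key, on which Python A raises KeyError.
def Pre_rows_by_match_key_py (rows : List (List (String × String))) : Prop :=
  ∀ row ∈ rows, "organism" ∈ row.map (·.1) ∧ "contig_id" ∈ row.map (·.1)
instance (rows : List (List (String × String))) : Decidable (Pre_rows_by_match_key_py rows) := by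
  unfold Pre_rows_by_match_key_py; infer_instance

def pvWitness_rows_by_match_key_py : (List (List (String × String))) :=
  [[("organism", "E. coli"), ("contig_id", "c1")], [("organism", "E. coli"), ("contig_id", "c2")]]

def Spec_rows_by_match_key_py (rows : List (List (String × String))) (out : List (String × String × List Int)) : Prop := out = rows_by_match_key_py_alt rows
instance (rows : List (List (String × String))) (out : List (String × String × List Int)) : Decidable (Spec_rows_by_match_key_py rows out) := by unfold Spec_rows_by_match_key_py; infer_instance

-- ===== CLAIM (what is proved, stated in full; the proofs are below) =====
def Claim_equal_rows_by_match_key_py : Prop := ∀ (rows : List (List (String × String))), Dom_rows_by_match_key_py rows → Pre_rows_by_match_key_py rows → Spec_rows_by_match_key_py rows (rows_by_match_key_py rows)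

-- ===== LEMMAS AND PROOFS =====

theorem pv_enumerate_map {α β : Type} (f : α → β) (xs : List α) (s : Int) :
    PySem.List.enumerate (xs.map f) s
      = (PySem.List.enumerate xs s).map (fun p => (p.1, f p.2)) := by
  induction xs generalizing s with
  | nil => simp [PySem.List.enumerate_nil]
  | cons x xs ih => simp [PySem.List.enumerate_cons, ih]

-- ===== VERDICT (by name: the statement is the Claim_ definition above) =====
set_option maxHeartbeats 1600000 in
theorem rows_by_match_key_py_spec : Claim_equal_rows_by_match_key_py := by
  intro rows _ _
  unfold Spec_rows_by_match_key_py rows_by_match_key_py rows_by_match_key_py_alt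
  have hkeys : (PySem.List.enumerate rows 0).map (fun p => pvKey p.2) = rows.map pvKey := by
    conv_rhs => rw [← PySem.List.map_snd_enumerate rows 0]
    rw [List.map_map]
    rfl
  have hnd : ((PySem.List.enumerate rows 0).foldl
      (fun (g : PySem.Dict (String × String) (List Int)) p =>
        g.modify (pvKey p.2) [] (fun v => v ++ [p.1])) PySem.Dict.empty).keys.Nodup :=
    PySem.Dict.nodup_keys_foldl_modify_key (PySem.List.enumerate rows 0)
      (fun p : Int × List (String × String) => pvKey p.2) []
      (fun _ (p : Int × List (String × String)) (v : List Int) => v ++ [p.1])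
      PySem.Dict.empty (by simp)
  have hk : ((PySem.List.enumerate rows 0).foldl
      (fun (g : PySem.Dict (String × String) (List Int)) p =>
        g.modify (pvKey p.2) [] (fun v => v ++ [p.1])) PySem.Dict.empty).keys
      = PySem.List.dedup (rows.map pvKey) := by
    have h : ((PySem.List.enumerate rows 0).foldl
        (fun (g : PySem.Dict (String × String) (List Int)) p =>
          g.modify (pvKey p.2) [] (fun v => v ++ [p.1])) PySem.Dict.empty).keys
        = PySem.Set.update PySem.Dict.empty.keys
            ((PySem.List.enumerate rows 0).map (fun p => pvKey p.2)) :=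
      PySem.Dict.keys_foldl_modify_key (PySem.List.enumerate rows 0)
        (fun p : Int × List (String × String) => pvKey p.2) []
        (fun _ (p : Int × List (String × String)) (v : List Int) => v ++ [p.1])
        PySem.Dict.empty
    rw [h, hkeys]
    simp [PySem.Set.update, PySem.List.dedup_eq_ofList, PySem.Set.ofList_eq_foldl,
      PySem.Dict.keys_empty]
  have hgetD : ∀ k, ((PySem.List.enumerate rows 0).foldl
      (fun (g : PySem.Dict (String × String) (List Int)) p =>
        g.modify (pvKey p.2) [] (fun v => v ++ [p.1])) PySem.Dict.empty).getD k []
      = ((PySem.List.enumerate (rows.map pvKey) 0).filter (fun p => p.2 == k)).map (·.1) := by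
    intro k
    have hfold : (PySem.List.enumerate rows 0).foldl
        (fun (g : PySem.Dict (String × String) (List Int)) p =>
          g.modify (pvKey p.2) [] (fun v => v ++ [p.1])) PySem.Dict.empty
        = ((PySem.List.enumerate rows 0).map (fun p => (pvKey p.2, p.1))).foldl
            (fun d p => d.modify p.1 [] (fun v => v ++ [p.2])) PySem.Dict.empty := by
      rw [List.foldl_map]
    rw [hfold, PySem.Dict.getD_foldl_modify_append, PySem.Dict.getD_empty,
      pv_enumerate_map]
    simp [List.filter_map, List.map_map, Function.comp_def]
  rw [PySem.Dict.items_eq_map_keys _ hnd [], hk, List.map_map]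
  refine List.map_congr_left ?_
  intro k _
  simp only [Function.comp]
  rw [hgetD k]
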